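-- pv_equiv track=rewrite | github.com/Zach-Girard/SHARE_seq | demultiplex.py | mismatch_sequence
-- ===== SOURCE A (Python) =====
-- import itertools
--
-- def mismatch_sequence(seq, max_mismatch):
-- 	"""Generate sequences within <= max_mismatch substitutions."""
-- 	seq = seq.upper()
-- 	alphabet = ("A", "C", "G", "T")
-- 	out = {seq}
-- 	if max_mismatch <= 0:
-- 		return out
-- 	positions = range(len(seq))
-- 	for d in range(1, max_mismatch + 1):
-- 		for idxs in itertools.combinations(positions, d):
-- 			for repl in itertools.product(alphabet, repeat=d):
-- 				s = list(seq)
-- 				ok = False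
-- 				for i, base in zip(idxs, repl):
-- 					if s[i] != base:
-- 						s[i] = base
-- 						ok = True
-- 				if ok:
-- 					out.add("".join(s))
-- 	return out
-- ===== SOURCE B (Python) =====
-- def mismatch_sequence(seq, max_mismatch):
--     """Generate sequences within <= max_mismatch substitutions.
--
--     Arithmetic unranking: every result at distance d corresponds to a unique
--     pair (combination rank, mixed-radix code).  For each rank/code index we
--     decode the positions to change (combinatorial number system) and the
--     replacement bases (mixed-radix digits) directly, so each string is built
--     exactly once from integer arithmetic and no membership test is needed.
--     """
--     seq = seq.upper()
--     n = len(seq)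
--     choices = ["".join(b for b in "ACGT" if b != ch) for ch in seq]
--
--     def comb(m, r):
--         if r > m:
--             return 0
--         c = 1
--         for i in range(r):
--             c = c * (m - i) // (i + 1)
--         return c
--
--     def unrank(c, d, x=0):
--         # c-th d-combination of {x, ..., n-1} in lexicographic order
--         if d == 0:
--             return []
--         block = comb(n - x - 1, d - 1)
--         if c < block:
--             return [x] + unrank(c, d - 1, x + 1)
--         return unrank(c - block, d, x + 1)
--
--     out = [seq]
--     for d in range(1, min(max_mismatch, n) + 1):
--         for c in range(comb(n, d)):
--             J = unrank(c, d)
--             radix = [len(choices[j]) for j in J]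
--             total = 1
--             for r in radix:
--                 total *= r
--             for t in range(total):
--                 s = list(seq)
--                 v = t
--                 for j, r in zip(reversed(J), reversed(radix)):
--                     s[j] = choices[j][v % r]
--                     v //= r
--                 out.append("".join(s))
--     return set(out)
-- ===== Notes on version B (the rewrite author's own statement) =====
-- stated objective: alternative
-- what changed: A enumerates candidates with itertools.combinations x itertools.product over the full 4-letter alphabet and deduplicates through a set with an ok-flag; B addresses each result by an integer pair and decodes it arithmetically - combination ranks are unranked via the combinatorial number system (binomial-coefficient blocks) and replacement bases via mixed-radix divmod over only the bases differing from the original character - so every string is constructed exactly once from its index, with no generators, no membership test and the distance loop capped at len(seq).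
import Mathlib
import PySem

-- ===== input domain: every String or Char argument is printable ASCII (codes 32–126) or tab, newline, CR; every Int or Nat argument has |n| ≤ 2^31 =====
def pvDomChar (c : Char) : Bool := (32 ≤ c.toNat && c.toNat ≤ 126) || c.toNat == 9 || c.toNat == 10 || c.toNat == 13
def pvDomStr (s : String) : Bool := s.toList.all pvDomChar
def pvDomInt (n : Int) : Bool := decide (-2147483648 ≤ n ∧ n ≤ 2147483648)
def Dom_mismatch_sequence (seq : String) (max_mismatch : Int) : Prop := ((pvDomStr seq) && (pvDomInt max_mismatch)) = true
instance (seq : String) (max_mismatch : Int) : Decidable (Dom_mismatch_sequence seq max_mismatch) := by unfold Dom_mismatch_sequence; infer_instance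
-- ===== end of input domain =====

-- B replaces A's itertools generators + dedup set by arithmetic unranking: each output at
-- distance d is addressed by an integer pair (combination rank, mixed-radix base code) and
-- decoded directly, producing every string exactly once; Python sets are modelled as
-- first-occurrence lists (PySem.Set).

-- ===== PORT A =====
-- itertools.combinations(xs, d), in itertools' lexicographic order
def pvCombinations {α : Type} : List α → Nat → List (List α)
  | _, 0 => [[]]
  | [], _+1 => []
  | x :: xs, d+1 => ((pvCombinations xs d).map (fun t => x :: t)) ++ pvCombinations xs (d+1)

-- itertools.product(xs, repeat=d), rightmost varying fastest
def pvProduct {α : Type} (xs : List α) : Nat → List (List α)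
  | 0 => [[]]
  | d+1 => xs.flatMap (fun x => (pvProduct xs d).map (fun t => x :: t))

-- strings are handled as their character lists; "".join(list(seq)-style s) = String.ofList s
def mismatch_sequence (seq : String) (max_mismatch : Int) : List String :=
  let u := PySem.Chars.upper seq.toList
  let alphabet : List Char := ['A', 'C', 'G', 'T']
  let out : PySem.Set String := PySem.Set.add PySem.Set.empty (String.ofList u)
  if max_mismatch ≤ 0 then out
  else
    let positions := PySem.List.pyRange 0 (u.length : Int) 1
    (PySem.List.pyRange 1 (max_mismatch + 1) 1).foldl (fun out d =>
      (pvCombinations positions d.toNat).foldl (fun out idxs =>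
        (pvProduct alphabet d.toNat).foldl (fun out repl =>
          let sok := (idxs.zip repl).foldl (fun sok ib =>
            if PySem.List.pyGetD sok.1 ib.1 ' ' ≠ ib.2
            then (PySem.List.pySetD sok.1 ib.1 ib.2, true) else sok) (u, false)
          if sok.2 then PySem.Set.add out (String.ofList sok.1) else out) out) out) out

-- ===== PORT B =====
-- comb(m, r) of Source B: multiplicative binomial loop (Python's // is exact division here,
-- so Nat division is exact on every intermediate value)
def pvC (m r : Nat) : Nat :=
  if m < r then 0 else (List.range r).foldl (fun c i => c * (m - i) / (i + 1)) 1

-- unrank(c, d, x) of Source B: c-th d-combination of {x..n-1}, lexicographic; Python's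
-- recursion increments x and is ported with an explicit fuel (= n - x on every real call),
-- a pure totality guard that never fires on the ranks the caller supplies
def pvUnrankF (n : Nat) : Nat → Nat → Nat → Nat → List Nat
  | 0, _, _, _ => []
  | fuel+1, c, d, x =>
    if d = 0 then []
    else
      let block := pvC (n - x - 1) (d - 1)
      if c < block then x :: pvUnrankF n fuel c (d - 1) (x + 1)
      else pvUnrankF n fuel (c - block) d (x + 1)

-- Source B's main loop: for each distance d, decode every (combination rank, mixed-radix code)
def mismatch_sequence_alt (seq : String) (max_mismatch : Int) : List String :=
  let u := PySem.Chars.upper seq.toList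
  let n := u.length
  let choices : List (List Char) :=
    u.map (fun ch => (['A', 'C', 'G', 'T'] : List Char).filter (fun b => b ≠ ch))
  let out : List String := [String.ofList u]
  let out := (PySem.List.pyRange 1 (min max_mismatch (n : Int) + 1) 1).foldl (fun out d =>
    (List.range (pvC n d.toNat)).foldl (fun out c =>
      let J := pvUnrankF n n c d.toNat 0
      let radix := J.map (fun j => (choices.getD j []).length)
      let total := radix.foldl (fun a r => a * r) 1
      (List.range total).foldl (fun out t =>
        let sv := ((J.reverse).zip (radix.reverse)).foldl
          (fun (sv : List Char × Nat) jr =>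
            (sv.1.set jr.1 ((choices.getD jr.1 []).getD (sv.2 % jr.2) ' '), sv.2 / jr.2))
          (u, t)
        out ++ [String.ofList sv.1]) out) out) out
  PySem.Set.ofList out

-- ===== PRECONDITION & SPEC =====
def Spec_mismatch_sequence (seq : String) (max_mismatch : Int) (out : List String) : Prop := out = mismatch_sequence_alt seq max_mismatch
instance (seq : String) (max_mismatch : Int) (out : List String) : Decidable (Spec_mismatch_sequence seq max_mismatch out) := by unfold Spec_mismatch_sequence; infer_instance

-- ===== CLAIM (what is proved, stated in full; the proofs are below) =====
def Claim_equal_mismatch_sequence : Prop := ∀ (seq : String) (max_mismatch : Int), Dom_mismatch_sequence seq max_mismatch → Spec_mismatch_sequence seq max_mismatch (mismatch_sequence seq max_mismatch)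

-- ===== LEMMAS AND PROOFS =====

-- proof-side vocabulary
def pvB : List Char := ['A', 'C', 'G', 'T']

-- apply a list of (position, base) substitutions to u
def pvAppF (s : List Char) (ps : List (Int × Char)) : List Char :=
  ps.foldl (fun s p => PySem.List.pySetD s p.1 p.2) s

def pvApp (u : List Char) (ps : List (Int × Char)) : List Char := pvAppF u ps

-- a pair actually changes u
def pvDiffP (u : List Char) (p : Int × Char) : Bool := decide (PySem.List.pyGetD u p.1 ' ' ≠ p.2)

-- cartesian product of a list of lists, lexicographic
def pvListProd {α : Type} : List (List α) → List (List α)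
  | [] => [[]]
  | l :: ls => l.flatMap (fun x => (pvListProd ls).map (fun t => x :: t))

-- the filtered product: at each chosen position only bases differing from u there
def pvFP (u : List Char) (J : List Int) : List (List Char) :=
  pvListProd (J.map (fun j => pvB.filter (fun b => b ≠ PySem.List.pyGetD u j ' ')))

-- A's layer d: all strings at Hamming distance exactly d, in first-occurrence order
def pvExact (u : List Char) (d : Nat) : List (List Char) :=
  (pvCombinations (PySem.List.pyRange 0 (u.length : Int) 1) d).flatMap
    (fun J => (pvFP u J).map (fun V => pvApp u (J.zip V)))

-- accumulated output after layers 1..d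
def pvAcc (u : List Char) (d : Nat) : List (List Char) :=
  u :: (List.range d).flatMap (fun m => pvExact u (m+1))

-- positions where t differs from u
def pvDiffs (u t : List Char) : List Nat :=
  (List.range u.length).filter (fun i => t.getD i ' ' ≠ u.getD i ' ')

def pvGood (u t : List Char) : Prop :=
  t.length = u.length ∧ ∀ i ∈ pvDiffs u t, t.getD i ' ' ∈ pvB

-- clean substitution lists: in-range, pairwise-distinct positions
def pvClean (u : List Char) (ps : List (Int × Char)) : Prop :=
  (∀ p ∈ ps, 0 ≤ p.1 ∧ p.1 < (u.length : Int)) ∧ ps.Pairwise (fun p q => p.1 ≠ q.1)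

-- B-side proof vocabulary: choice list, mixed radix and decoder
def pvCh (u : List Char) (j : Nat) : List Char := pvB.filter (fun b => b ≠ u.getD j ' ')

def pvTot (u : List Char) (J : List Nat) : Nat :=
  (J.map (fun j => (pvCh u j).length)).foldl (fun a r => a * r) 1

def pvDecode (u : List Char) (Jr : List Nat) (sv : List Char × Nat) : List Char × Nat :=
  Jr.foldl (fun sv j =>
    (sv.1.set j ((pvCh u j).getD (sv.2 % (pvCh u j).length) ' '), sv.2 / (pvCh u j).length)) sv

def pvN (j : Nat) : Int := Int.ofNat j

-- ---- generic list facts ----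
lemma pv_sorted_ext : ∀ (xs ys : List Nat), xs.Pairwise (· < ·) → ys.Pairwise (· < ·) →
    (∀ a, a ∈ xs ↔ a ∈ ys) → xs = ys := by
  intro xs
  induction xs with
  | nil =>
    intro ys _ _ h
    cases ys with
    | nil => rfl
    | cons y ys => exact absurd ((h y).mpr (List.mem_cons_self)) (List.not_mem_nil)
  | cons x xs ih =>
    intro ys hx hy h
    cases ys with
    | nil => exact absurd ((h x).mp (List.mem_cons_self)) (List.not_mem_nil)
    | cons y ys =>
      have hx' := List.pairwise_cons.mp hx
      have hy' := List.pairwise_cons.mp hy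
      have hxy : x = y := by
        rcases List.mem_cons.mp ((h x).mp List.mem_cons_self) with h1 | h1
        · exact h1
        · rcases List.mem_cons.mp ((h y).mpr List.mem_cons_self) with h2 | h2
          · exact h2.symm
          · have := hx'.1 y h2
            have := hy'.1 x h1
            omega
      subst hxy
      have htail : ∀ a, a ∈ xs ↔ a ∈ ys := by
        intro a
        constructor
        · intro ha
          have hlt := hx'.1 a ha
          rcases List.mem_cons.mp ((h a).mp (List.mem_cons_of_mem _ ha)) with h1 | h1
          · omega
          · exact h1
        · intro ha
          have hlt := hy'.1 a ha
          rcases List.mem_cons.mp ((h a).mpr (List.mem_cons_of_mem _ ha)) with h1 | h1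
          · omega
          · exact h1
      rw [ih ys hx'.2 hy'.2 htail]

-- ---- pvCombinations ----
lemma pvCombinations_mem_sublist {α : Type} : ∀ (xs : List α) (d : Nat) (J : List α),
    J ∈ pvCombinations xs d → J.Sublist xs := by
  intro xs
  induction xs with
  | nil =>
    intro d J h
    cases d with
    | zero => simp [pvCombinations] at h; simp [h]
    | succ d => simp [pvCombinations] at h
  | cons x xs ih =>
    intro d J h
    cases d with
    | zero => simp [pvCombinations] at h; simp [h]
    | succ d =>
      rw [pvCombinations, List.mem_append] at h
      rcases h with h | h
      · rcases List.mem_map.mp h with ⟨t, ht, rfl⟩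
        exact (ih d t ht).cons₂ x
      · exact (ih (d+1) J h).cons x

lemma pvCombinations_mem_length {α : Type} : ∀ (xs : List α) (d : Nat) (J : List α),
    J ∈ pvCombinations xs d → J.length = d := by
  intro xs
  induction xs with
  | nil =>
    intro d J h
    cases d with
    | zero => simp [pvCombinations] at h; simp [h]
    | succ d => simp [pvCombinations] at h
  | cons x xs ih =>
    intro d J h
    cases d with
    | zero => simp [pvCombinations] at h; simp [h]
    | succ d =>
      rw [pvCombinations, List.mem_append] at h
      rcases h with h | h
      · rcases List.mem_map.mp h with ⟨t, ht, rfl⟩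
        simp [ih d t ht]
      · exact ih (d+1) J h

lemma pvCombinations_complete {α : Type} : ∀ (xs J : List α),
    J.Sublist xs → J ∈ pvCombinations xs J.length := by
  intro xs J h
  induction h with
  | slnil => simp [pvCombinations]
  | @cons J xs x hsub ih =>
    cases J with
    | nil => simp [pvCombinations]
    | cons j J' =>
      rw [List.length_cons, pvCombinations, List.mem_append]
      exact Or.inr ih
  | @cons₂ J xs x hsub ih =>
    rw [List.length_cons, pvCombinations, List.mem_append]
    exact Or.inl (List.mem_map.mpr ⟨J, ih, rfl⟩)

lemma pvCombinations_empty {α : Type} : ∀ (xs : List α) (d : Nat),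
    xs.length < d → pvCombinations xs d = [] := by
  intro xs
  induction xs with
  | nil =>
    intro d h
    cases d with
    | zero => omega
    | succ d => rfl
  | cons x xs ih =>
    intro d h
    cases d with
    | zero => omega
    | succ d =>
      rw [pvCombinations, ih d (by simp at h; omega), ih (d+1) (by simp at h ⊢; omega)]
      rfl

lemma pvCombinations_nodup {α : Type} : ∀ (xs : List α) (d : Nat),
    xs.Nodup → (pvCombinations xs d).Nodup := by
  intro xs
  induction xs with
  | nil =>
    intro d _
    cases d with
    | zero => simp [pvCombinations]
    | succ d => simp [pvCombinations]
  | cons x xs ih =>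
    intro d hnd
    rcases List.nodup_cons.mp hnd with ⟨hx, hxs⟩
    cases d with
    | zero => simp [pvCombinations]
    | succ d =>
      rw [pvCombinations]
      apply List.Nodup.append
      · exact (ih d hxs).map (fun a b hab => by injection hab)
      · exact ih (d+1) hxs
      · intro J hJ hJ'
        rcases List.mem_map.mp hJ with ⟨t, _, rfl⟩
        have hsub := pvCombinations_mem_sublist xs (d+1) (x :: t) hJ'
        exact hx (hsub.subset List.mem_cons_self)

lemma pvCombinations_length {α : Type} : ∀ (xs : List α) (d : Nat),
    (pvCombinations xs d).length = Nat.choose xs.length d := by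
  intro xs
  induction xs with
  | nil =>
    intro d
    cases d with
    | zero => rfl
    | succ d => rfl
  | cons x xs ih =>
    intro d
    cases d with
    | zero => simp [pvCombinations]
    | succ d =>
      rw [pvCombinations, List.length_append, List.length_map, ih d, ih (d+1),
        List.length_cons, Nat.choose_succ_succ]

lemma pvCombinations_map {α β : Type} (f : α → β) : ∀ (xs : List α) (d : Nat),
    pvCombinations (xs.map f) d = (pvCombinations xs d).map (List.map f) := by
  intro xs
  induction xs with
  | nil =>
    intro d
    cases d with
    | zero => rfl
    | succ d => rfl
  | cons x xs ih =>
    intro d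
    cases d with
    | zero => rfl
    | succ d =>
      rw [List.map_cons, pvCombinations, pvCombinations, ih d, ih (d+1),
        List.map_append, List.map_map, List.map_map]
      rfl

-- ---- pvListProd / pvProduct ----
lemma pv_mem_listProd {α : Type} : ∀ (ls : List (List α)) (V : List α),
    V ∈ pvListProd ls ↔ List.Forall₂ (fun x l => x ∈ l) V ls := by
  intro ls
  induction ls with
  | nil =>
    intro V
    simp [pvListProd, List.forall₂_nil_right_iff]
  | cons l ls ih =>
    intro V
    rw [pvListProd, List.mem_flatMap, List.forall₂_cons_right_iff]
    constructor
    · rintro ⟨x, hx, hV⟩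
      rcases List.mem_map.mp hV with ⟨t, ht, rfl⟩
      exact ⟨x, t, hx, (ih t).mp ht, rfl⟩
    · rintro ⟨x, t, hx, ht, rfl⟩
      exact ⟨x, hx, List.mem_map.mpr ⟨t, (ih t).mpr ht, rfl⟩⟩

lemma pvListProd_append_singleton {α : Type} : ∀ (ls : List (List α)) (l : List α),
    pvListProd (ls ++ [l]) = (pvListProd ls).flatMap (fun V => l.map (fun x => V ++ [x])) := by
  intro ls
  induction ls with
  | nil =>
    intro l
    have haux : ∀ l : List α, l.flatMap (fun x => [[x]]) = l.map (fun x => [x]) := by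
      intro l
      induction l with
      | nil => rfl
      | cons b l ihl => rw [List.flatMap_cons, List.map_cons, ihl]; rfl
    simp only [List.nil_append, pvListProd, List.flatMap_cons, List.flatMap_nil,
      List.append_nil]
    exact haux l
  | cons l' ls ih =>
    intro l
    rw [List.cons_append, pvListProd, pvListProd, ih]
    simp [List.flatMap_assoc, List.flatMap_map, List.map_flatMap, List.map_map, Function.comp_def]

lemma pv_flatMap_nodup {α β : Type} : ∀ (l : List α) (f : α → List β),
    l.Nodup → (∀ x ∈ l, (f x).Nodup) →
    (∀ x ∈ l, ∀ y ∈ l, x ≠ y → ∀ t ∈ f x, t ∉ f y) → (l.flatMap f).Nodup := by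
  intro l
  induction l with
  | nil => intro f _ _ _; simp
  | cons x l ih =>
    intro f hnd hf hdisj
    rcases List.nodup_cons.mp hnd with ⟨hx, hl⟩
    rw [List.flatMap_cons]
    apply List.Nodup.append
    · exact hf x List.mem_cons_self
    · exact ih f hl (fun y hy => hf y (List.mem_cons_of_mem _ hy))
        (fun a ha b hb => hdisj a (List.mem_cons_of_mem _ ha) b (List.mem_cons_of_mem _ hb))
    · intro t ht ht'
      rcases List.mem_flatMap.mp ht' with ⟨y, hy, hty⟩
      have hxy : x ≠ y := fun h => hx (h ▸ hy)
      exact hdisj x List.mem_cons_self y (List.mem_cons_of_mem _ hy) hxy t ht hty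

lemma pvListProd_nodup {α : Type} : ∀ (ls : List (List α)),
    (∀ l ∈ ls, l.Nodup) → (pvListProd ls).Nodup := by
  intro ls
  induction ls with
  | nil => intro _; simp [pvListProd]
  | cons l ls ih =>
    intro h
    rw [pvListProd]
    apply pv_flatMap_nodup
    · exact h l List.mem_cons_self
    · intro x _
      exact (ih (fun l' hl' => h l' (List.mem_cons_of_mem _ hl'))).map
        (fun a b hab => by injection hab)
    · intro x _ y _ hxy t ht ht'
      rcases List.mem_map.mp ht with ⟨a, _, rfl⟩
      rcases List.mem_map.mp ht' with ⟨b, _, hb⟩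
      injection hb.symm with h1 h2
      exact hxy h1

lemma pvFP_mem_length (u : List Char) (J : List Int) (V : List Char) :
    V ∈ pvFP u J → V.length = J.length := by
  intro h
  have := ((pv_mem_listProd _ V).mp h).length_eq
  simpa using this

lemma pv_flatMap_if {α β : Type} : ∀ (l : List α) (p : α → Bool) (g : α → List β),
    (l.flatMap (fun x => if p x then g x else [])) = (l.filter p).flatMap g := by
  intro l p g
  induction l with
  | nil => rfl
  | cons x l ih => cases hp : p x <;> simp [List.filter_cons, hp, ih]

lemma pv_filter_map {α β : Type} (l : List α) (f : α → β) (p : β → Bool) :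
    (l.map f).filter p = (l.filter (fun x => p (f x))).map f := by
  induction l with
  | nil => rfl
  | cons x l ih =>
    by_cases hp : p (f x) = true
    · simp [List.filter_cons, hp, ih]
    · simp [List.filter_cons, hp, ih]

lemma pv_prod_filter (u : List Char) : ∀ (J : List Int),
    (pvProduct pvB J.length).filter (fun V => (J.zip V).all (pvDiffP u)) = pvFP u J := by
  intro J
  induction J with
  | nil => rfl
  | cons j J ih =>
    rw [List.length_cons, pvProduct, List.filter_flatMap]
    have hinner : ∀ b : Char,
        ((pvProduct pvB J.length).map (fun t => b :: t)).filter
            (fun V => ((j :: J).zip V).all (pvDiffP u))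
          = if pvDiffP u (j, b) then ((pvProduct pvB J.length).filter
              (fun V => (J.zip V).all (pvDiffP u))).map (fun t => b :: t) else [] := by
      intro b
      rw [pv_filter_map]
      by_cases hd : pvDiffP u (j, b) = true
      · rw [if_pos hd]
        congr 1
        apply List.filter_congr
        intro V _
        simp [hd]
      · rw [if_neg hd]
        have hnil : (pvProduct pvB J.length).filter
            (fun x => ((j :: J).zip (b :: x)).all (pvDiffP u)) = [] := by
          apply List.filter_eq_nil_iff.mpr
          intro V _
          simp only [List.zip_cons_cons, List.all_cons, Bool.and_eq_true]
          intro hcon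
          exact hd hcon.1
        rw [hnil, List.map_nil]
    simp only [hinner]
    rw [pv_flatMap_if, ih]
    have hfil : pvB.filter (fun b => pvDiffP u (j, b))
        = pvB.filter (fun b => b ≠ PySem.List.pyGetD u j ' ') := by
      apply List.filter_congr
      intro b _
      simp [pvDiffP, ne_comm]
    rw [hfil]
    simp [pvFP, pvListProd]

-- ---- pvApp ----
lemma pv_pyGetD_nonneg (xs : List Char) (i : Int) (h : 0 ≤ i) :
    PySem.List.pyGetD xs i ' ' = xs.getD i.toNat ' ' := by
  rw [← Int.toNat_of_nonneg h, PySem.List.pyGetD_natCast]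
  have hmax : (max i 0).toNat = i.toNat := by omega
  simp [List.getD_eq_getElem?_getD, hmax]

lemma pvAppF_length (ps : List (Int × Char)) : ∀ (s : List Char), (pvAppF s ps).length = s.length := by
  induction ps with
  | nil => intro s; rfl
  | cons p ps ih =>
    intro s
    show (pvAppF (PySem.List.pySetD s p.1 p.2) ps).length = s.length
    rw [ih, PySem.List.length_pySetD]

lemma pv_pyGetD_pySetD_ne (s : List Char) (i j : Int) (v : Char) (hi : 0 ≤ i) (hj : 0 ≤ j)
    (hij : i ≠ j) :
    PySem.List.pyGetD (PySem.List.pySetD s i v) j ' ' = PySem.List.pyGetD s j ' ' := by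
  rw [pv_pyGetD_nonneg _ _ hj, pv_pyGetD_nonneg _ _ hj, PySem.List.pySetD_of_nonneg _ _ hi]
  have hne : i.toNat ≠ j.toNat := by omega
  simp [List.getD_eq_getElem?_getD, List.getElem?_set, hne]

lemma pvAppF_getD_not_mem (ps : List (Int × Char)) : ∀ (s : List Char) (i : Nat),
    (∀ p ∈ ps, 0 ≤ p.1) → (∀ p ∈ ps, p.1 ≠ (i : Int)) →
    (pvAppF s ps).getD i ' ' = s.getD i ' ' := by
  induction ps with
  | nil => intro s i _ _; rfl
  | cons p ps ih =>
    intro s i hpos hne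
    show (pvAppF (PySem.List.pySetD s p.1 p.2) ps).getD i ' ' = s.getD i ' '
    rw [ih _ i (fun q hq => hpos q (List.mem_cons_of_mem _ hq))
        (fun q hq => hne q (List.mem_cons_of_mem _ hq))]
    have h1 : 0 ≤ p.1 := hpos p List.mem_cons_self
    have h2 : p.1 ≠ (i : Int) := hne p List.mem_cons_self
    rw [PySem.List.pySetD_of_nonneg _ _ h1]
    have hne' : p.1.toNat ≠ i := by omega
    simp [List.getD_eq_getElem?_getD, List.getElem?_set, hne']

lemma pvAppF_getD_mem : ∀ (ps : List (Int × Char)) (s : List Char),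
    (∀ p ∈ ps, 0 ≤ p.1 ∧ p.1 < (s.length : Int)) →
    ps.Pairwise (fun p q => p.1 ≠ q.1) →
    ∀ p ∈ ps, (pvAppF s ps).getD p.1.toNat ' ' = p.2 := by
  intro ps
  induction ps with
  | nil => intro s _ _ p hp; exact absurd hp List.not_mem_nil
  | cons q ps ih =>
    intro s hr hnd p hp
    rcases List.pairwise_cons.mp hnd with ⟨hq, htl⟩
    have hq0 : 0 ≤ q.1 ∧ q.1 < (s.length : Int) := hr q List.mem_cons_self
    rcases List.mem_cons.mp hp with rfl | hp'
    · show (pvAppF (PySem.List.pySetD s p.1 p.2) ps).getD p.1.toNat ' ' = p.2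
      rw [pvAppF_getD_not_mem ps _ p.1.toNat
          (fun r hr' => (hr r (List.mem_cons_of_mem _ hr')).1)
          (fun r hr' => by
            have := hq r hr'
            have h0 : 0 ≤ p.1 := hq0.1
            omega)]
      rw [PySem.List.pySetD_of_nonneg _ _ hq0.1]
      have hlt : p.1.toNat < s.length := by omega
      simp [List.getD_eq_getElem?_getD, List.getElem?_set, hlt]
    · show (pvAppF (PySem.List.pySetD s q.1 q.2) ps).getD p.1.toNat ' ' = p.2
      apply ih
      · intro r hr'
        have := hr r (List.mem_cons_of_mem _ hr')
        rwa [PySem.List.length_pySetD]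
      · exact htl
      · exact hp'

lemma pvApp_getD_mem (u : List Char) (ps : List (Int × Char)) (hc : pvClean u ps) :
    ∀ p ∈ ps, (pvApp u ps).getD p.1.toNat ' ' = p.2 := by
  exact pvAppF_getD_mem ps u hc.1 hc.2

-- A's inner zip-loop: condition read off the evolving s equals condition against u
lemma pv_inner_gen (u : List Char) : ∀ (ps : List (Int × Char)) (s : List Char) (ok : Bool),
    (∀ p ∈ ps, 0 ≤ p.1 ∧ p.1 < (s.length : Int)) →
    ps.Pairwise (fun p q => p.1 ≠ q.1) →
    (∀ p ∈ ps, PySem.List.pyGetD s p.1 ' ' = PySem.List.pyGetD u p.1 ' ') →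
    ps.foldl (fun sok ib =>
        if PySem.List.pyGetD sok.1 ib.1 ' ' ≠ ib.2
        then (PySem.List.pySetD sok.1 ib.1 ib.2, true) else sok) (s, ok)
      = (pvAppF s (ps.filter (pvDiffP u)), ok || ps.any (pvDiffP u)) := by
  intro ps
  induction ps with
  | nil => intro s ok _ _ _; simp [pvAppF]
  | cons p ps ih =>
    intro s ok hr hnd hagr
    rcases List.pairwise_cons.mp hnd with ⟨hq, htl⟩
    have hp0 := hr p List.mem_cons_self
    have hag : PySem.List.pyGetD s p.1 ' ' = PySem.List.pyGetD u p.1 ' ' :=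
      hagr p List.mem_cons_self
    rw [List.foldl_cons]
    by_cases hd : PySem.List.pyGetD u p.1 ' ' ≠ p.2
    · rw [if_pos (by rw [hag]; exact hd)]
      have hdb : pvDiffP u p = true := by simp [pvDiffP, hd]
      rw [List.filter_cons_of_pos hdb]
      rw [ih (PySem.List.pySetD s p.1 p.2) true
          (fun q hq' => by
            have := hr q (List.mem_cons_of_mem _ hq')
            rwa [PySem.List.length_pySetD])
          htl
          (fun q hq' => by
            have hq0 := hr q (List.mem_cons_of_mem _ hq')
            rw [pv_pyGetD_pySetD_ne s p.1 q.1 p.2 hp0.1 hq0.1 (hq q hq')]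
            exact hagr q (List.mem_cons_of_mem _ hq'))]
      simp [pvAppF, List.any_cons, hdb]
    · rw [if_neg (by rw [hag]; exact hd)]
      have hdb : pvDiffP u p = false := by simp [pvDiffP]; simpa using hd
      rw [List.filter_cons_of_neg (by simp [hdb])]
      rw [ih s ok (fun q hq' => hr q (List.mem_cons_of_mem _ hq')) htl
          (fun q hq' => hagr q (List.mem_cons_of_mem _ hq'))]
      simp [List.any_cons, hdb]

lemma pv_inner_fold (u : List Char) (ps : List (Int × Char)) (hc : pvClean u ps) :
    ps.foldl (fun sok ib =>
        if PySem.List.pyGetD sok.1 ib.1 ' ' ≠ ib.2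
        then (PySem.List.pySetD sok.1 ib.1 ib.2, true) else sok) (u, false)
      = (pvApp u (ps.filter (pvDiffP u)), ps.any (pvDiffP u)) := by
  rw [pv_inner_gen u ps u false hc.1 hc.2 (fun p _ => rfl)]
  simp [pvApp]

-- ---- soundness: what a clean all-differing substitution produces ----
lemma pv_diffs_eq (u : List Char) (ps : List (Int × Char)) (hc : pvClean u ps)
    (hs : ps.Pairwise (fun p q => p.1 < q.1)) (hd : ∀ p ∈ ps, pvDiffP u p = true) :
    pvDiffs u (pvApp u ps) = ps.map (fun p => p.1.toNat) := by
  apply pv_sorted_ext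
  · first
    | exact List.Pairwise.sublist List.filter_sublist List.pairwise_lt_range
    | exact List.pairwise_lt_range.sublist List.filter_sublist
    | exact List.filter_sublist.pairwise List.pairwise_lt_range
  · rw [List.pairwise_map]
    apply List.Pairwise.imp_of_mem ?_ hs
    intro p q hp hq h
    have h0 := (hc.1 p hp).1
    omega
  · intro i
    simp only [pvDiffs, List.mem_filter, List.mem_range, decide_eq_true_eq]
    constructor
    · rintro ⟨hin, hne⟩
      by_contra hno
      apply hne
      rw [pvApp] at *
      apply pvAppF_getD_not_mem ps u i (fun p hp => (hc.1 p hp).1)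
      intro p hp hpi
      exact hno (List.mem_map.mpr ⟨p, hp, by omega⟩)
    · intro hi
      rcases List.mem_map.mp hi with ⟨p, hp, rfl⟩
      have h0 := hc.1 p hp
      have hv := pvApp_getD_mem u ps hc p hp
      have hdp := hd p hp
      rw [pvDiffP, decide_eq_true_iff, pv_pyGetD_nonneg u p.1 h0.1] at hdp
      constructor
      · omega
      · rw [hv]
        exact fun h => hdp h.symm

lemma pv_good_app (u : List Char) (ps : List (Int × Char)) (hc : pvClean u ps)
    (hb : ∀ p ∈ ps, p.2 ∈ pvB) : pvGood u (pvApp u ps) := by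
  constructor
  · exact pvAppF_length ps u
  · intro i hi
    simp only [pvDiffs, List.mem_filter, List.mem_range, decide_eq_true_eq] at hi
    by_cases hex : ∃ p ∈ ps, p.1 = (i : Int)
    · rcases hex with ⟨p, hp, hpi⟩
      have hv := pvApp_getD_mem u ps hc p hp
      rw [hpi] at hv
      simp only [Int.toNat_natCast] at hv
      rw [pvApp] at *
      rw [hv]
      exact hb p hp
    · exfalso
      apply hi.2
      rw [pvApp] at *
      apply pvAppF_getD_not_mem ps u i (fun p hp => (hc.1 p hp).1)
      intro p hp hpi
      exact hex ⟨p, hp, hpi⟩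

lemma pv_diffs_nil (u t : List Char) (hl : t.length = u.length) (h : pvDiffs u t = []) : t = u := by
  have hall := List.filter_eq_nil_iff.mp h
  apply List.ext_getElem hl
  intro i h1 h2
  have := hall i (List.mem_range.mpr h2)
  simp only [decide_eq_true_eq, Bool.not_eq_true, decide_eq_false_iff_not, not_not] at this
  rw [List.getD_eq_getElem _ _ h1, List.getD_eq_getElem _ _ h2] at this
  exact this

-- facts about members of combinations of range(n)
lemma pv_comb_facts (u : List Char) {d : Nat} {J : List Int}
    (hJ : J ∈ pvCombinations (PySem.List.pyRange 0 (u.length : Int) 1) d) :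
    J.length = d ∧ J.Pairwise (· < ·) ∧ ∀ j ∈ J, 0 ≤ j ∧ j < (u.length : Int) := by
  have hsub := pvCombinations_mem_sublist _ _ _ hJ
  refine ⟨pvCombinations_mem_length _ _ _ hJ, ?_, ?_⟩
  · first
    | exact List.Pairwise.sublist hsub (PySem.List.pairwise_lt_pyRange_one _ _)
    | exact (PySem.List.pairwise_lt_pyRange_one _ _).sublist hsub
  · intro j hj
    have hmem := hsub.subset hj
    rw [PySem.List.mem_pyRange_one] at hmem
    exact hmem

lemma pv_FP_pointwise (u : List Char) : ∀ (J : List Int) (V : List Char), V ∈ pvFP u J →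
    ∀ p ∈ J.zip V, p.2 ∈ pvB ∧ p.2 ≠ PySem.List.pyGetD u p.1 ' ' := by
  intro J
  induction J with
  | nil => intro V _ p hp; simp at hp
  | cons j J ih =>
    intro V hV p hp
    have h2 := (pv_mem_listProd _ _).mp hV
    rw [List.map_cons] at h2
    rcases List.forall₂_cons_right_iff.mp h2 with ⟨b, V', hb, hV', rfl⟩
    rcases List.mem_filter.mp hb with ⟨hbB, hbne⟩
    rw [List.zip_cons_cons] at hp
    rcases List.mem_cons.mp hp with rfl | hp'
    · exact ⟨hbB, by simpa using hbne⟩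
    · exact ih V' ((pv_mem_listProd _ _).mpr (by simpa using hV')) p hp'

-- bundled facts for one block element t = pvApp u (J.zip V)
lemma pv_block (u : List Char) {d : Nat} {J : List Int} {V : List Char}
    (hJ : J ∈ pvCombinations (PySem.List.pyRange 0 (u.length : Int) 1) d)
    (hV : V ∈ pvFP u J) :
    pvGood u (pvApp u (J.zip V)) ∧ pvDiffs u (pvApp u (J.zip V)) = J.map Int.toNat := by
  obtain ⟨hlen, hpw, hrange⟩ := pv_comb_facts u hJ
  have hVlen : V.length = J.length := pvFP_mem_length u J V hV
  have hzf := pv_FP_pointwise u J V hV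
  have hfst : (J.zip V).map Prod.fst = J := List.map_fst_zip (by omega)
  have hpwz : (J.zip V).Pairwise (fun p q => p.1 < q.1) :=
    List.pairwise_map.mp (by rw [hfst]; exact hpw)
  have hclean : pvClean u (J.zip V) := by
    constructor
    · intro p hp
      rcases List.of_mem_zip hp with ⟨h1, _⟩
      exact hrange p.1 h1
    · exact hpwz.imp (fun h => by omega)
  have hdall : ∀ p ∈ J.zip V, pvDiffP u p = true := by
    intro p hp
    have := (hzf p hp).2
    simp [pvDiffP]
    exact fun h => this h.symm
  refine ⟨pv_good_app u _ hclean (fun p hp => (hzf p hp).1), ?_⟩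
  rw [pv_diffs_eq u _ hclean hpwz hdall]
  calc (J.zip V).map (fun p => p.1.toNat)
      = ((J.zip V).map Prod.fst).map Int.toNat := by rw [List.map_map]; rfl
    _ = J.map Int.toNat := by rw [hfst]

lemma pv_R0 (m : Nat) :
    PySem.List.pyRange 0 (m : Int) 1 = (List.range m).map (fun k : Nat => (k : Int)) := by
  rw [PySem.List.pyRange_one]
  have h1 : ((m : Int) - 0).toNat = m := by omega
  rw [h1]
  apply List.map_congr_left
  intro k _
  omega

lemma pv_forall₂_map_map {α β γ : Type} {R : β → γ → Prop} : ∀ (l : List α) (f : α → β) (g : α → γ),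
    (∀ x ∈ l, R (f x) (g x)) → List.Forall₂ R (l.map f) (l.map g) := by
  intro l f g
  induction l with
  | nil => intro _; simp
  | cons x l ih =>
    intro h
    simp only [List.map_cons]
    exact List.Forall₂.cons (h x List.mem_cons_self)
      (ih (fun y hy => h y (List.mem_cons_of_mem _ hy)))

-- membership characterisations
lemma pv_mem_exact (u : List Char) (d : Nat) (t : List Char) :
    t ∈ pvExact u d ↔ pvGood u t ∧ (pvDiffs u t).length = d := by
  constructor
  · intro ht
    rcases List.mem_flatMap.mp ht with ⟨J, hJ, hmem⟩
    rcases List.mem_map.mp hmem with ⟨V, hV, rfl⟩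
    obtain ⟨hgood, hdiffs⟩ := pv_block u hJ hV
    refine ⟨hgood, ?_⟩
    rw [hdiffs, List.length_map, (pv_comb_facts u hJ).1]
  · rintro ⟨hgood, hlen⟩
    have hDpw : (pvDiffs u t).Pairwise (· < ·) := by
      first
      | exact List.Pairwise.sublist List.filter_sublist List.pairwise_lt_range
      | exact List.pairwise_lt_range.sublist List.filter_sublist
    have hDlt : ∀ i ∈ pvDiffs u t, i < u.length := by
      intro i hi
      exact List.mem_range.mp (List.mem_filter.mp hi).1
    have hDne : ∀ i ∈ pvDiffs u t, t.getD i ' ' ≠ u.getD i ' ' := by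
      intro i hi
      simpa using (List.mem_filter.mp hi).2
    have hJmem : (pvDiffs u t).map Int.ofNat
        ∈ pvCombinations (PySem.List.pyRange 0 (u.length : Int) 1) d := by
      have hsub : ((pvDiffs u t).map Int.ofNat).Sublist
          ((List.range u.length).map Int.ofNat) :=
        List.Sublist.map _ List.filter_sublist
      have hR : PySem.List.pyRange 0 ((u.length : Nat) : Int) 1
          = (List.range u.length).map Int.ofNat := by
        rw [pv_R0]
        apply List.map_congr_left
        intro k _
        rw [Int.ofNat_eq_natCast]
      rw [hR]
      have hc := pvCombinations_complete _ _ hsub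
      rwa [List.length_map, hlen] at hc
    have hVmem : (pvDiffs u t).map (fun i : Nat => t.getD i ' ')
        ∈ pvFP u ((pvDiffs u t).map Int.ofNat) := by
      apply (pv_mem_listProd _ _).mpr
      rw [List.map_map]
      apply pv_forall₂_map_map
      intro i hi
      show t.getD i ' ' ∈ pvB.filter (fun b => b ≠ PySem.List.pyGetD u (Int.ofNat i) ' ')
      rw [List.mem_filter]
      refine ⟨hgood.2 i hi, ?_⟩
      have h2 : PySem.List.pyGetD u (Int.ofNat i) ' ' = u.getD i ' ' := by
        rw [Int.ofNat_eq_natCast, PySem.List.pyGetD_natCast]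
      rw [h2]
      simpa using hDne i hi
    have hzip : ((pvDiffs u t).map Int.ofNat).zip
          ((pvDiffs u t).map (fun i : Nat => t.getD i ' '))
        = (pvDiffs u t).map (fun i : Nat => (Int.ofNat i, t.getD i ' ')) := by
      rw [List.zip_map']
    have hclean : pvClean u ((pvDiffs u t).map (fun i : Nat => (Int.ofNat i, t.getD i ' '))) := by
      constructor
      · intro p hp
        rcases List.mem_map.mp hp with ⟨i, hi, rfl⟩
        have hl := hDlt i hi
        have h1 : (0 : Int) ≤ Int.ofNat i := by rw [Int.ofNat_eq_natCast]; omega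
        have h2 : Int.ofNat i < (u.length : Int) := by rw [Int.ofNat_eq_natCast]; omega
        exact ⟨h1, h2⟩
      · rw [List.pairwise_map]
        apply hDpw.imp
        intro a b hab
        show Int.ofNat a ≠ Int.ofNat b
        rw [Int.ofNat_eq_natCast, Int.ofNat_eq_natCast]
        omega
    have happ : t = pvApp u (((pvDiffs u t).map Int.ofNat).zip
        ((pvDiffs u t).map (fun i : Nat => t.getD i ' '))) := by
      rw [hzip]
      apply List.ext_getElem
      · rw [pvApp, pvAppF_length, hgood.1]
      · intro i h1 h2
        have hn : i < u.length := by
          rw [pvApp, pvAppF_length] at h2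
          exact h2
        by_cases hi : i ∈ pvDiffs u t
        · have hp : (Int.ofNat i, t.getD i ' ')
              ∈ (pvDiffs u t).map (fun i : Nat => (Int.ofNat i, t.getD i ' ')) :=
            List.mem_map.mpr ⟨i, hi, rfl⟩
          have hv := pvApp_getD_mem u _ hclean _ hp
          rw [← List.getD_eq_getElem _ ' ' h1, ← List.getD_eq_getElem _ ' ' h2]
          exact hv.symm
        · have hnm : ∀ p ∈ (pvDiffs u t).map (fun i : Nat => (Int.ofNat i, t.getD i ' ')),
              p.1 ≠ (i : Int) := by
            intro p hp
            rcases List.mem_map.mp hp with ⟨i', hi', rfl⟩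
            intro h
            have h' : (i' : Int) = (i : Int) := by
              rw [← Int.ofNat_eq_natCast]
              exact h
            have : i' = i := by omega
            exact hi (this ▸ hi')
          have hne := pvAppF_getD_not_mem _ u i (fun p hp => (hclean.1 p hp).1) hnm
          have heq : t.getD i ' ' = u.getD i ' ' := by
            by_contra hcon
            exact hi (List.mem_filter.mpr ⟨List.mem_range.mpr hn, by simpa using hcon⟩)
          rw [← List.getD_eq_getElem _ ' ' h1, ← List.getD_eq_getElem _ ' ' h2, pvApp, hne, heq]
    rw [happ]
    exact List.mem_flatMap.mpr ⟨_, hJmem, List.mem_map.mpr ⟨_, hVmem, rfl⟩⟩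

lemma pv_diffs_self (u : List Char) : pvDiffs u u = [] := by
  apply List.filter_eq_nil_iff.mpr
  intro i _
  simp

lemma pv_acc_succ (u : List Char) (d : Nat) :
    pvAcc u (d+1) = pvAcc u d ++ pvExact u (d+1) := by
  simp [pvAcc, List.range_succ]

lemma pv_mem_acc (u : List Char) (d : Nat) (t : List Char) :
    t ∈ pvAcc u d ↔ pvGood u t ∧ (pvDiffs u t).length ≤ d := by
  induction d with
  | zero =>
    simp only [pvAcc, List.range_zero, List.flatMap_nil, List.mem_singleton]
    constructor
    · rintro rfl
      refine ⟨⟨rfl, ?_⟩, ?_⟩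
      · intro i hi
        rw [pv_diffs_self] at hi
        exact absurd hi List.not_mem_nil
      · rw [pv_diffs_self]; simp
    · rintro ⟨hgood, hlen⟩
      have : pvDiffs u t = [] := List.length_eq_zero_iff.mp (by omega)
      exact pv_diffs_nil u t hgood.1 this
  | succ d ih =>
    rw [pv_acc_succ, List.mem_append, ih, pv_mem_exact]
    constructor
    · rintro (⟨h1, h2⟩ | ⟨h1, h2⟩)
      · exact ⟨h1, by omega⟩
      · exact ⟨h1, by omega⟩
    · rintro ⟨h1, h2⟩
      by_cases hle : (pvDiffs u t).length ≤ d
      · exact Or.inl ⟨h1, hle⟩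
      · exact Or.inr ⟨h1, by omega⟩

lemma pv_map_toNat_inj {J J' : List Int} (hJ : ∀ j ∈ J, 0 ≤ j) (hJ' : ∀ j ∈ J', 0 ≤ j)
    (h : J.map Int.toNat = J'.map Int.toNat) : J = J' := by
  have h2 := congrArg (List.map (fun n : Nat => (n : Int))) h
  rw [List.map_map, List.map_map] at h2
  have e1 : J.map ((fun n : Nat => (n : Int)) ∘ Int.toNat) = J := by
    conv_rhs => rw [← List.map_id J]
    apply List.map_congr_left
    intro j hj
    simp [Function.comp, Int.toNat_of_nonneg (hJ j hj)]
  have e2 : J'.map ((fun n : Nat => (n : Int)) ∘ Int.toNat) = J' := by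
    conv_rhs => rw [← List.map_id J']
    apply List.map_congr_left
    intro j hj
    simp [Function.comp, Int.toNat_of_nonneg (hJ' j hj)]
  rwa [e1, e2] at h2

lemma pv_zip_getElem_mem {α β : Type} : ∀ (J : List α) (V : List β) (i : Nat),
    (hiJ : i < J.length) → (hiV : i < V.length) → (J[i], V[i]) ∈ J.zip V := by
  intro J
  induction J with
  | nil => intro V i h _; simp at h
  | cons j J ih =>
    intro V i hiJ hiV
    cases V with
    | nil => simp at hiV
    | cons v V =>
      cases i with
      | zero => simp
      | succ i =>
        rw [List.zip_cons_cons]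
        exact List.mem_cons_of_mem _ (ih V i (by simpa using hiJ) (by simpa using hiV))

lemma pv_exact_nodup (u : List Char) (d : Nat) : (pvExact u d).Nodup := by
  apply pv_flatMap_nodup
  · exact pvCombinations_nodup _ d (PySem.List.nodup_pyRange_one 0 _)
  · intro J hJ
    obtain ⟨hlen, hpw, hrange⟩ := pv_comb_facts u hJ
    apply List.Nodup.map_on
    · intro V hV V' hV' heq
      have hVl := pvFP_mem_length u J V hV
      have hVl' := pvFP_mem_length u J V' hV'
      have hcleanV : pvClean u (J.zip V) := by
        constructor
        · intro p hp; exact hrange p.1 (List.of_mem_zip hp).1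
        · have hfst : (J.zip V).map Prod.fst = J := List.map_fst_zip (by omega)
          exact (List.pairwise_map.mp (by rw [hfst]; exact hpw)).imp (fun h => by omega)
      have hcleanV' : pvClean u (J.zip V') := by
        constructor
        · intro p hp; exact hrange p.1 (List.of_mem_zip hp).1
        · have hfst : (J.zip V').map Prod.fst = J := List.map_fst_zip (by omega)
          exact (List.pairwise_map.mp (by rw [hfst]; exact hpw)).imp (fun h => by omega)
      apply List.ext_getElem (by omega)
      intro i hi1 hi2
      have hiJ : i < J.length := by omega
      have hp1 : (J[i], V[i]) ∈ J.zip V := pv_zip_getElem_mem J V i hiJ hi1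
      have hp2 : (J[i], V'[i]) ∈ J.zip V' := pv_zip_getElem_mem J V' i hiJ hi2
      have e1 := pvApp_getD_mem u _ hcleanV _ hp1
      have e2 := pvApp_getD_mem u _ hcleanV' _ hp2
      simp only at e1 e2
      rw [← e1, ← e2, heq]
    · apply pvListProd_nodup
      intro l hl
      rcases List.mem_map.mp hl with ⟨j, _, rfl⟩
      exact List.Nodup.filter _ (by decide)
  · intro J hJ J' hJ' hne t ht ht'
    rcases List.mem_map.mp ht with ⟨V, hV, rfl⟩
    rcases List.mem_map.mp ht' with ⟨V', hV', heq⟩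
    obtain ⟨_, hd1⟩ := pv_block u hJ hV
    obtain ⟨_, hd2⟩ := pv_block u hJ' hV'
    rw [heq] at hd2
    apply hne
    exact pv_map_toNat_inj (fun j hj => ((pv_comb_facts u hJ).2.2 j hj).1)
      (fun j hj => ((pv_comb_facts u hJ').2.2 j hj).1) (hd1.symm.trans hd2)

-- ---- set-fold shapes ----
lemma pv_fold_if_add {γ : Type} (S : PySem.Set String) (l : List γ) (c : γ → Bool) (f : γ → String) :
    l.foldl (fun S x => if c x then PySem.Set.add S (f x) else S) S
      = PySem.Set.update S ((l.filter c).map f) := by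
  induction l generalizing S with
  | nil => simp [PySem.Set.update_nil]
  | cons x l ih =>
    rw [List.foldl_cons]
    by_cases hc : c x = true
    · rw [if_pos hc, List.filter_cons_of_pos hc, List.map_cons, PySem.Set.update_cons, ih]
    · rw [if_neg hc, List.filter_cons_of_neg (by simp [hc]), ih]

lemma pv_fold_update {γ : Type} (S : PySem.Set String) (l : List γ) (g : γ → List String) :
    l.foldl (fun S x => PySem.Set.update S (g x)) S = PySem.Set.update S (l.flatMap g) := by
  induction l generalizing S with
  | nil => simp [PySem.Set.update_nil]
  | cons x l ih => rw [List.foldl_cons, List.flatMap_cons, PySem.Set.update_append, ih]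

lemma pv_ofList_filter {α : Type} [BEq α] [LawfulBEq α] (xs : List α) (p : α → Bool) :
    (PySem.Set.ofList xs).filter p = PySem.Set.ofList (xs.filter p) := by
  induction xs using List.reverseRecOn with
  | nil => rfl
  | append_singleton xs x ih =>
    rw [PySem.Set.ofList_append_singleton, List.filter_append, PySem.Set.add]
    by_cases hmem : x ∈ xs
    · have hc : (PySem.Set.ofList xs).contains x = true :=
        (PySem.Set.contains_iff _ _).mpr ((PySem.Set.mem_ofList _ _).mpr hmem)
      rw [if_pos hc]
      by_cases hp : p x = true
      · have : List.filter p [x] = [x] := by simp [hp]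
        rw [this, PySem.Set.ofList_append_singleton, PySem.Set.add]
        have hc2 : (PySem.Set.ofList (xs.filter p)).contains x = true := by
          rw [PySem.Set.contains_iff, PySem.Set.mem_ofList, List.mem_filter]
          exact ⟨hmem, hp⟩
        rw [if_pos hc2, ih]
      · have : List.filter p [x] = [] := by simp [hp]
        rw [this, List.append_nil, ih]
    · have hc : ¬ (PySem.Set.ofList xs).contains x = true := by
        rw [PySem.Set.contains_iff, PySem.Set.mem_ofList]; exact hmem
      rw [if_neg hc, List.filter_append]
      by_cases hp : p x = true
      · have h1 : List.filter p [x] = [x] := by simp [hp]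
        rw [h1, PySem.Set.ofList_append_singleton, PySem.Set.add]
        have hc2 : ¬ (PySem.Set.ofList (xs.filter p)).contains x = true := by
          rw [PySem.Set.contains_iff, PySem.Set.mem_ofList, List.mem_filter]
          intro h; exact hmem h.1
        rw [if_neg hc2, ih]
      · have h1 : List.filter p [x] = [] := by simp [hp]
        rw [h1, List.append_nil, List.append_nil, ih]

lemma pv_mem_product {α : Type} (xs : List α) : ∀ (d : Nat) (V : List α),
    V ∈ pvProduct xs d → V.length = d ∧ ∀ b ∈ V, b ∈ xs := by
  intro d
  induction d with
  | zero =>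
    intro V h
    simp only [pvProduct, List.mem_singleton] at h
    subst h
    exact ⟨rfl, by simp⟩
  | succ d ih =>
    intro V h
    rw [pvProduct, List.mem_flatMap] at h
    rcases h with ⟨x, hx, hV⟩
    rcases List.mem_map.mp hV with ⟨t, ht, rfl⟩
    obtain ⟨h1, h2⟩ := ih t ht
    refine ⟨by simp [h1], ?_⟩
    intro b hb
    rcases List.mem_cons.mp hb with rfl | hb'
    · exact hx
    · exact h2 b hb'

lemma pv_filter_lt {α : Type} : ∀ (l : List α) (p : α → Bool) (x : α),
    x ∈ l → p x = false → (l.filter p).length < l.length := by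
  intro l p
  induction l with
  | nil => intro x hx _; exact absurd hx List.not_mem_nil
  | cons y l ih =>
    intro x hx hpx
    rcases List.mem_cons.mp hx with rfl | hx'
    · rw [List.filter_cons_of_neg (by simp [hpx])]
      have := List.length_filter_le p l
      simp only [List.length_cons]
      omega
    · cases hpy : p y
      · rw [List.filter_cons_of_neg (by simp [hpy])]
        have := ih x hx' hpx
        simp only [List.length_cons]
        omega
      · rw [List.filter_cons_of_pos hpy]
        have := ih x hx' hpx
        simp only [List.length_cons]
        omega

lemma pv_flatMap_congr {α β : Type} : ∀ (l : List α) (f g : α → List β),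
    (∀ x ∈ l, f x = g x) → l.flatMap f = l.flatMap g := by
  intro l f g
  induction l with
  | nil => intro _; rfl
  | cons x l ih =>
    intro h
    rw [List.flatMap_cons, List.flatMap_cons, h x List.mem_cons_self,
      ih (fun y hy => h y (List.mem_cons_of_mem _ hy))]

lemma pv_contains_map_ofList (L : List (List Char)) (t : List Char) :
    PySem.Set.contains (L.map String.ofList) (String.ofList t) = true ↔ t ∈ L := by
  rw [PySem.Set.contains_iff]
  constructor
  · intro h
    rcases List.mem_map.mp h with ⟨x, hx, he⟩
    rwa [String.ofList_inj.mp he] at hx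
  · intro h
    exact List.mem_map.mpr ⟨t, h, rfl⟩

-- facts about one candidate (J, V) of A's layer
lemma pv_cand_facts (u : List Char) {d : Nat} {J : List Int} {V : List Char}
    (hJ : J ∈ pvCombinations (PySem.List.pyRange 0 (u.length : Int) 1) d)
    (hV : V ∈ pvProduct pvB d) :
    pvClean u ((J.zip V).filter (pvDiffP u)) ∧
    pvGood u (pvApp u ((J.zip V).filter (pvDiffP u))) ∧
    (pvDiffs u (pvApp u ((J.zip V).filter (pvDiffP u)))).length
      = ((J.zip V).filter (pvDiffP u)).length ∧
    (J.zip V).length = d := by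
  obtain ⟨hJl, hpw, hrange⟩ := pv_comb_facts u hJ
  obtain ⟨hVl, hVB⟩ := pv_mem_product pvB d V hV
  have hfst : (J.zip V).map Prod.fst = J := List.map_fst_zip (by omega)
  have hzpw : (J.zip V).Pairwise (fun p q => p.1 < q.1) :=
    List.pairwise_map.mp (by rw [hfst]; exact hpw)
  have hsub := List.filter_sublist (p := pvDiffP u) (l := J.zip V)
  have hclean : pvClean u ((J.zip V).filter (pvDiffP u)) := by
    constructor
    · intro p hp
      exact hrange p.1 (List.of_mem_zip (hsub.subset hp)).1
    · exact (List.Pairwise.sublist hsub hzpw).imp (fun h => by omega)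
  have hpw' : ((J.zip V).filter (pvDiffP u)).Pairwise (fun p q => p.1 < q.1) :=
    List.Pairwise.sublist hsub hzpw
  have hdall : ∀ p ∈ (J.zip V).filter (pvDiffP u), pvDiffP u p = true := by
    intro p hp
    exact (List.mem_filter.mp hp).2
  have hgood : pvGood u (pvApp u ((J.zip V).filter (pvDiffP u))) := by
    apply pv_good_app u _ hclean
    intro p hp
    exact hVB p.2 (List.of_mem_zip (hsub.subset hp)).2
  refine ⟨hclean, hgood, ?_, ?_⟩
  · rw [pv_diffs_eq u _ hclean hpw' hdall, List.length_map]
  · rw [List.length_zip]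
    omega

-- A's layer d+1 appends exactly the new, distance-(d+1) strings
lemma pv_layer_step (u : List Char) (d : Nat) :
    PySem.Set.update ((pvAcc u d).map String.ofList)
        ((pvCombinations (PySem.List.pyRange 0 (u.length : Int) 1) (d+1)).flatMap
          (fun J => (((pvProduct pvB (d+1)).filter
              (fun V => (J.zip V).any (pvDiffP u))).map
            (fun V => String.ofList (pvApp u ((J.zip V).filter (pvDiffP u)))))))
      = (pvAcc u (d+1)).map String.ofList := by
  rw [PySem.Set.update_eq_append_filter, pv_ofList_filter, List.filter_flatMap]
  have hJcong : ∀ J ∈ pvCombinations (PySem.List.pyRange 0 (u.length : Int) 1) (d+1),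
      (((pvProduct pvB (d+1)).filter (fun V => (J.zip V).any (pvDiffP u))).map
          (fun V => String.ofList (pvApp u ((J.zip V).filter (pvDiffP u))))).filter
        (fun y => !(PySem.Set.contains ((pvAcc u d).map String.ofList) y))
      = ((pvFP u J).map (fun V => pvApp u (J.zip V))).map String.ofList := by
    intro J hJ
    rw [pv_filter_map, List.filter_filter]
    have hcond : ∀ V ∈ pvProduct pvB (d+1),
        ((!(PySem.Set.contains ((pvAcc u d).map String.ofList)
            (String.ofList (pvApp u ((J.zip V).filter (pvDiffP u)))))) &&
          (J.zip V).any (pvDiffP u))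
        = (J.zip V).all (pvDiffP u) := by
      intro V hV
      obtain ⟨hclean, hgood, hdl, hzl⟩ := pv_cand_facts u hJ hV
      have hcont : PySem.Set.contains ((pvAcc u d).map String.ofList)
          (String.ofList (pvApp u ((J.zip V).filter (pvDiffP u)))) = true
          ↔ ((J.zip V).filter (pvDiffP u)).length ≤ d := by
        rw [pv_contains_map_ofList, pv_mem_acc]
        constructor
        · intro h; omega
        · intro h; exact ⟨hgood, by omega⟩
      cases hall : (J.zip V).all (pvDiffP u)
      · rcases List.all_eq_false.mp hall with ⟨x, hx, hpx⟩
        have hlt := pv_filter_lt (J.zip V) (pvDiffP u) x hx (by simpa using hpx)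
        have hle : ((J.zip V).filter (pvDiffP u)).length ≤ d := by omega
        rw [(by simpa using hcont.mpr hle : PySem.Set.contains
          ((pvAcc u d).map String.ofList)
          (String.ofList (pvApp u ((J.zip V).filter (pvDiffP u)))) = true)]
        simp
      · have hfull : (J.zip V).filter (pvDiffP u) = J.zip V :=
          List.filter_eq_self.mpr (List.all_eq_true.mp hall)
        have hlen : ((J.zip V).filter (pvDiffP u)).length = d + 1 := by
          rw [hfull]; exact hzl
        have hnc : ¬ PySem.Set.contains ((pvAcc u d).map String.ofList)
            (String.ofList (pvApp u ((J.zip V).filter (pvDiffP u)))) = true := by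
          intro h
          have := hcont.mp h
          omega
        have hne : J.zip V ≠ [] := by
          intro h
          rw [h] at hzl
          simp at hzl
        obtain ⟨x, hx⟩ := List.exists_mem_of_ne_nil _ hne
        have hany : (J.zip V).any (pvDiffP u) = true :=
          List.any_eq_true.mpr ⟨x, hx, List.all_eq_true.mp hall x hx⟩
        rw [hany, Bool.eq_false_iff.mpr hnc]
        simp
    rw [List.filter_congr hcond]
    have hJl : J.length = d + 1 := (pv_comb_facts u hJ).1
    rw [← hJl, pv_prod_filter u J]
    rw [List.map_congr_left (fun V hV => by
      rw [List.filter_eq_self.mpr (fun p hp => by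
        have := (pv_FP_pointwise u J V hV p hp).2
        simp [pvDiffP]
        exact fun h => this h.symm)])]
    simp [List.map_map, Function.comp_def]
  rw [pv_flatMap_congr _ _ _ hJcong]
  have hex : (pvCombinations (PySem.List.pyRange 0 (u.length : Int) 1) (d+1)).flatMap
      (fun J => ((pvFP u J).map (fun V => pvApp u (J.zip V))).map String.ofList)
      = (pvExact u (d+1)).map String.ofList := by
    rw [pvExact, List.map_flatMap]
  have hnd : ((pvExact u (d+1)).map String.ofList).Nodup := by
    first
    | exact (pv_exact_nodup u (d+1)).map (fun a b h => String.ofList_inj.mp h)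
    | exact List.Nodup.map (fun a b h => String.ofList_inj.mp h) (pv_exact_nodup u (d+1))
  rw [hex, PySem.Set.ofList_eq_self_of_nodup ((pvExact u (d+1)).map String.ofList) hnd,
    pv_acc_succ, List.map_append]

-- one whole layer of A, as a Set.update
lemma pv_layer_fold (u : List Char) (d : Nat) (S : PySem.Set String) :
    (pvCombinations (PySem.List.pyRange 0 (u.length : Int) 1) d).foldl (fun out idxs =>
      (pvProduct ['A','C','G','T'] d).foldl (fun out repl =>
        let sok := (idxs.zip repl).foldl (fun sok ib =>
          if PySem.List.pyGetD sok.1 ib.1 ' ' ≠ ib.2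
          then (PySem.List.pySetD sok.1 ib.1 ib.2, true) else sok) (u, false)
        if sok.2 then PySem.Set.add out (String.ofList sok.1) else out) out) S
    = PySem.Set.update S ((pvCombinations (PySem.List.pyRange 0 (u.length : Int) 1) d).flatMap
        (fun J => (((pvProduct pvB d).filter (fun V => (J.zip V).any (pvDiffP u))).map
          (fun V => String.ofList (pvApp u ((J.zip V).filter (pvDiffP u))))))) := by
  refine Eq.trans (PySem.List.foldl_congr_mem _ _ _ _ ?_) (pv_fold_update S _ _)
  intro acc J hJmem
  refine Eq.trans (PySem.List.foldl_congr_mem _ _ _ _ ?_) (pv_fold_if_add acc _ _ _)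
  intro acc2 V hVmem
  obtain ⟨hJl, hpw, hrange⟩ := pv_comb_facts u hJmem
  obtain ⟨hVl, _⟩ := pv_mem_product pvB d V hVmem
  have hfst : (J.zip V).map Prod.fst = J := List.map_fst_zip (by omega)
  have hzpw : (J.zip V).Pairwise (fun p q => p.1 < q.1) :=
    List.pairwise_map.mp (by rw [hfst]; exact hpw)
  have hcv : pvClean u (J.zip V) :=
    ⟨fun p hp => hrange p.1 (List.of_mem_zip hp).1, hzpw.imp (fun h => by omega)⟩
  rw [pv_inner_fold u (J.zip V) hcv]

-- ---- A equals the accumulator ----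
lemma pv_A_eq_acc (u : List Char) (k : Nat) :
    (PySem.List.pyRange 1 ((k : Int) + 1) 1).foldl (fun out d =>
      (pvCombinations (PySem.List.pyRange 0 (u.length : Int) 1) d.toNat).foldl (fun out idxs =>
        (pvProduct ['A','C','G','T'] d.toNat).foldl (fun out repl =>
          let sok := (idxs.zip repl).foldl (fun sok ib =>
            if PySem.List.pyGetD sok.1 ib.1 ' ' ≠ ib.2
            then (PySem.List.pySetD sok.1 ib.1 ib.2, true) else sok) (u, false)
          if sok.2 then PySem.Set.add out (String.ofList sok.1) else out) out) out)
      ((pvAcc u 0).map String.ofList)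
    = (pvAcc u k).map String.ofList := by
  induction k with
  | zero =>
    rw [show ((0 : Nat) : Int) + 1 = 1 by norm_num,
      PySem.List.pyRange_one_eq_nil (le_refl 1), List.foldl_nil]
  | succ k ih =>
    rw [show (((k+1 : Nat)) : Int) + 1 = ((k : Int) + 1) + 1 by push_cast; ring,
      PySem.List.pyRange_one_succ_right (by omega), List.foldl_append, ih,
      List.foldl_cons, List.foldl_nil]
    have ht : ((k : Int) + 1).toNat = k + 1 := by omega
    rw [ht, pv_layer_fold, pv_layer_step]

-- ===== B-side lemmas: unranking =====

-- Python's multiplicative comb IS the binomial coefficient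
lemma pv_foldC (m : Nat) : ∀ (r : Nat),
    (List.range r).foldl (fun c i => c * (m - i) / (i + 1)) 1 = Nat.choose m r := by
  intro r
  induction r with
  | zero => simp
  | succ r ih =>
    rw [List.range_succ, List.foldl_append, ih, List.foldl_cons, List.foldl_nil,
      ← Nat.choose_succ_right_eq, Nat.mul_div_cancel _ (Nat.succ_pos r)]

lemma pvC_eq_choose (m r : Nat) : pvC m r = Nat.choose m r := by
  rw [pvC]
  by_cases h : m < r
  · rw [if_pos h, Nat.choose_eq_zero_of_lt h]
  · rw [if_neg h, pv_foldC]

-- unranking computes indexing into the lexicographic combination list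
lemma pv_unrank_get : ∀ (m x c d : Nat), c < Nat.choose m d →
    pvUnrankF (x + m) m c d x = (pvCombinations (List.range' x m) d).getD c [] := by
  intro m
  induction m with
  | zero =>
    intro x c d hc
    cases d with
    | zero =>
      have hc0 : c = 0 := by simpa [Nat.choose] using hc
      subst hc0
      rfl
    | succ d => simp [Nat.choose] at hc
  | succ m ih =>
    intro x c d hc
    have hfe : x + (m + 1) = (x + 1) + m := by omega
    cases d with
    | zero =>
      have hc0 : c = 0 := by simpa using hc
      subst hc0
      simp [pvUnrankF, List.range'_succ, pvCombinations]
    | succ e =>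
      have hblock : pvC (x + (m + 1) - x - 1) e = Nat.choose m e := by
        have : x + (m + 1) - x - 1 = m := by omega
        rw [this, pvC_eq_choose]
      have hlen1 : ((pvCombinations (List.range' (x+1) m) e).map (fun t => x :: t)).length
          = Nat.choose m e := by
        rw [List.length_map, pvCombinations_length, List.length_range']
      rw [List.range'_succ, pvCombinations]
      show (if e + 1 = 0 then [] else _) = _
      rw [if_neg (by omega)]
      simp only [Nat.add_sub_cancel, hblock]
      by_cases hlt : c < Nat.choose m e
      · rw [if_pos hlt]
        rw [List.getD_eq_getElem?_getD, List.getElem?_append_left (by rw [hlen1]; exact hlt)]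
        rw [← List.getD_eq_getElem?_getD]
        have hcl : c < (pvCombinations (List.range' (x+1) m) e).length := by
          rw [pvCombinations_length, List.length_range']; exact hlt
        rw [List.getD_eq_getElem _ _ (by rw [List.length_map]; exact hcl),
          List.getElem_map, ← List.getD_eq_getElem _ [] hcl]
        have := ih (x+1) c e hlt
        rw [hfe, this]
      · rw [if_neg hlt]
        push_neg at hlt
        rw [List.getD_eq_getElem?_getD, List.getElem?_append_right (by rw [hlen1]; exact hlt),
          hlen1, ← List.getD_eq_getElem?_getD]
        have hcr : c - Nat.choose m e < Nat.choose m (e+1) := by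
          have h1 : c < Nat.choose (m+1) (e+1) := hc
          have h2 : Nat.choose (m+1) (e+1) = Nat.choose m e + Nat.choose m (e+1) :=
            Nat.choose_succ_succ m e
          omega
        have := ih (x+1) (c - Nat.choose m e) (e+1) hcr
        rw [hfe, this]

-- mapping over range of a list's length recovers the list
lemma pv_map_range {α β : Type} (L : List α) (d₀ : α) (f : α → β) :
    (List.range L.length).map (fun i => f (L.getD i d₀)) = L.map f := by
  apply List.ext_getElem
  · simp
  · intro i h1 h2
    simp only [List.getElem_map, List.getElem_range]
    rw [List.getD_eq_getElem _ _ (by simpa using h2)]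

lemma pv_flatMap_range_getD {α β : Type} (L : List α) (d₀ : α) (g : α → List β) :
    (List.range L.length).flatMap (fun c => g (L.getD c d₀)) = L.flatMap g := by
  have h1 : (List.range L.length).flatMap (fun c => g (L.getD c d₀))
      = ((List.range L.length).map (fun c => L.getD c d₀)).flatMap g := by
    rw [List.flatMap_map]
  have h2 : (List.range L.length).map (fun c => L.getD c d₀) = L := by
    apply List.ext_getElem
    · simp
    · intro i hi1 hi2
      simp only [List.getElem_map, List.getElem_range]
      rw [List.getD_eq_getElem _ _ (by simpa using hi2)]
  rw [h1, h2]

-- 'out.append(x)' loops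
lemma pv_foldl_append_singleton {α β : Type} (l : List α) (g : α → β) (out : List β) :
    l.foldl (fun out t => out ++ [g t]) out = out ++ l.map g := by
  induction l generalizing out with
  | nil => simp
  | cons x l ih => rw [List.foldl_cons, ih]; simp

lemma pv_range_mul (a b : Nat) :
    List.range (a * b) = (List.range a).flatMap (fun q => (List.range b).map (fun s => q*b + s)) := by
  induction a with
  | zero => simp
  | succ a ih =>
    rw [Nat.succ_mul, List.range_add, ih, List.range_succ, List.flatMap_append]
    simp [Nat.mul_comm]

-- the per-position choice list is never empty
lemma pvCh_pos (u : List Char) (j : Nat) : 0 < (pvCh u j).length := by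
  by_cases h : u.getD j ' ' = 'A'
  · apply List.length_pos_of_mem (a := 'C')
    rw [pvCh, List.mem_filter]
    constructor
    · decide
    · rw [h]; decide
  · apply List.length_pos_of_mem (a := 'A')
    rw [pvCh, List.mem_filter]
    refine ⟨by decide, by simpa using (fun he => h he.symm)⟩

-- setting an untouched position commutes with the decoder
lemma pv_decode_set (u : List Char) (j : Nat) (b : Char) :
    ∀ (P : List Nat) (s : List Char) (t : Nat), (∀ p ∈ P, p ≠ j) →
    pvDecode u P (s.set j b, t)
      = ((pvDecode u P (s, t)).1.set j b, (pvDecode u P (s, t)).2) := by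
  intro P
  induction P with
  | nil => intro s t _; rfl
  | cons p P ih =>
    intro s t hne
    have hpj : p ≠ j := hne p List.mem_cons_self
    show pvDecode u P ((s.set j b).set p _, t / _) = _
    rw [List.set_comm _ _ (fun h => hpj h.symm)]
    rw [ih _ _ (fun q hq => hne q (List.mem_cons_of_mem _ hq))]
    rfl

-- pvTot over an appended position
lemma pv_tot_append (u : List Char) (J : List Nat) (j : Nat) :
    pvTot u (J ++ [j]) = pvTot u J * (pvCh u j).length := by
  rw [pvTot, List.map_append, List.foldl_append]
  rfl

-- zipping a list with its own image
lemma pv_zip_self_map {α β : Type} (l : List α) (f : α → β) :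
    l.zip (l.map f) = l.map (fun x => (x, f x)) := by
  induction l with
  | nil => rfl
  | cons x l ih => simp [ih]

-- decoding all codes of J yields exactly the filtered-product block, in order
lemma pv_decode_eq (u : List Char) : ∀ (J : List Nat),
    (∀ j ∈ J, j < u.length) → J.Pairwise (· < ·) →
    (List.range (pvTot u J)).map (fun t => (pvDecode u J.reverse (u, t)).1)
      = (pvFP u (J.map pvN)).map
          (fun V => pvApp u ((J.map pvN).zip V)) := by
  intro J
  induction J using List.reverseRecOn with
  | nil =>
    intro _ _
    show (List.range (List.foldl _ 1 [])).map _ = _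
    simp [pvDecode, pvFP, pvListProd, pvApp, pvAppF]
  | append_singleton J j ih =>
    intro hlt hpw
    have hltJ : ∀ i ∈ J, i < u.length := fun i hi => hlt i (List.mem_append_left _ hi)
    have hjlt : j < u.length := hlt j (List.mem_append_right _ (by simp))
    have hpwJ : J.Pairwise (· < ·) := hpw.sublist (List.sublist_append_left _ _)
    have hjne : ∀ p ∈ J.reverse, p ≠ j := by
      intro p hp
      have hpJ : p ∈ J := List.mem_reverse.mp hp
      have := (List.pairwise_append.mp hpw).2.2 p hpJ j (by simp)
      omega
    have hr : 0 < (pvCh u j).length := pvCh_pos u j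
    rw [pv_tot_append, pv_range_mul, List.map_flatMap]
    have hrev : (J ++ [j]).reverse = j :: J.reverse := by simp
    have hstep : ∀ q s0, s0 < (pvCh u j).length →
        (pvDecode u (J ++ [j]).reverse (u, q * (pvCh u j).length + s0)).1
          = (pvDecode u J.reverse (u, q)).1.set j ((pvCh u j).getD s0 ' ') := by
      intro q s0 hs0
      rw [hrev]
      show (pvDecode u J.reverse
        (u.set j ((pvCh u j).getD ((q * (pvCh u j).length + s0) % (pvCh u j).length) ' '),
         (q * (pvCh u j).length + s0) / (pvCh u j).length)).1 = _
      have hmod : (q * (pvCh u j).length + s0) % (pvCh u j).length = s0 := by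
        rw [Nat.mul_add_mod', Nat.mod_eq_of_lt hs0]
      have hdiv : (q * (pvCh u j).length + s0) / (pvCh u j).length = q := by
        rw [Nat.add_comm, Nat.add_mul_div_right _ _ hr, Nat.div_eq_of_lt hs0, Nat.zero_add]
      rw [hmod, hdiv, pv_decode_set u j _ J.reverse u q hjne]
    have hLHS : ∀ q, ((List.range (pvCh u j).length).map
          (fun s0 => q * (pvCh u j).length + s0)).map
            (fun t => (pvDecode u (J ++ [j]).reverse (u, t)).1)
        = (pvCh u j).map (fun b => (pvDecode u J.reverse (u, q)).1.set j b) := by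
      intro q
      rw [List.map_map]
      simp only [Function.comp_def]
      have h1 : ∀ s0 ∈ List.range (pvCh u j).length,
          (pvDecode u (J ++ [j]).reverse (u, q * (pvCh u j).length + s0)).1
            = (pvDecode u J.reverse (u, q)).1.set j ((pvCh u j).getD s0 ' ') := by
        intro s0 hs0
        exact hstep q s0 (List.mem_range.mp hs0)
      rw [List.map_congr_left (fun s0 hs0 => h1 s0 hs0)]
      exact pv_map_range (pvCh u j) ' ' (fun b => (pvDecode u J.reverse (u, q)).1.set j b)
    rw [pv_flatMap_congr _ _ _ (fun q _ => hLHS q)]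
    -- package the per-block function and use the induction hypothesis
    have hpack : (List.range (pvTot u J)).flatMap
          (fun q => (pvCh u j).map (fun b => (pvDecode u J.reverse (u, q)).1.set j b))
        = ((List.range (pvTot u J)).map (fun t => (pvDecode u J.reverse (u, t)).1)).flatMap
            (fun X => (pvCh u j).map (fun b => X.set j b)) := by
      rw [List.flatMap_map]
    rw [hpack, ih hltJ hpwJ, List.flatMap_map]
    -- now the right-hand side
    have hgj : pvB.filter (fun b => b ≠ PySem.List.pyGetD u (pvN j) ' ') = pvCh u j := by
      rw [pvN, Int.ofNat_eq_natCast, PySem.List.pyGetD_natCast]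
      rfl
    have hRHS : pvFP u ((J ++ [j]).map pvN)
        = (pvFP u (J.map pvN)).flatMap
            (fun V => (pvCh u j).map (fun b => V ++ [b])) := by
      rw [List.map_append, pvFP, List.map_append]
      simp only [List.map_singleton]
      rw [pvListProd_append_singleton, ← hgj]
      rfl
    rw [hRHS, List.map_flatMap]
    apply pv_flatMap_congr
    intro V hV
    rw [List.map_map]
    have hVl : V.length = J.length := by
      have := pvFP_mem_length u _ V hV
      simpa using this
    apply List.map_congr_left
    intro b _
    simp only [Function.comp]
    have hzap : ((J ++ [j]).map pvN).zip (V ++ [b])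
        = ((J.map pvN).zip V) ++ [(pvN j, b)] := by
      rw [List.map_append, List.zip_append (by simp [hVl])]
      rfl
    have happ : pvApp u (((J ++ [j]).map pvN).zip (V ++ [b]))
        = PySem.List.pySetD (pvApp u ((J.map pvN).zip V)) (pvN j) b := by
      rw [hzap, pvApp, pvAppF, List.foldl_append]
      rfl
    rw [happ, PySem.List.pySetD_of_nonneg _ _ (by simp [pvN])]
    simp [pvN]

lemma pv_R0N (m : Nat) :
    PySem.List.pyRange 0 (m : Int) 1 = (List.range m).map pvN := by
  rw [pv_R0]
  apply List.map_congr_left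
  intro k _
  simp [pvN]

-- proof-side names for the port's choice table and one layer of B's main loop
def pvChoices (u : List Char) : List (List Char) :=
  u.map (fun ch => (['A','C','G','T'] : List Char).filter (fun b => b ≠ ch))

def pvLayerB (u : List Char) (d : Nat) (out : List String) : List String :=
  (List.range (pvC u.length d)).foldl (fun out c =>
    let J := pvUnrankF u.length u.length c d 0
    let radix := J.map (fun j => ((pvChoices u).getD j []).length)
    let total := radix.foldl (fun a r => a * r) 1
    (List.range total).foldl (fun out t =>
      let sv := ((J.reverse).zip (radix.reverse)).foldl
        (fun (sv : List Char × Nat) jr =>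
          (sv.1.set jr.1 (((pvChoices u).getD jr.1 []).getD (sv.2 % jr.2) ' '), sv.2 / jr.2))
        (u, t)
      out ++ [String.ofList sv.1]) out) out

-- one whole layer of B equals A's layer-d block
lemma pv_B_layer (u : List Char) (d : Nat) (out : List String) :
    pvLayerB u d out = out ++ (pvExact u d).map String.ofList := by
  have hlen : (pvCombinations (List.range u.length) d).length = Nat.choose u.length d := by
    rw [pvCombinations_length, List.length_range]
  rw [pvLayerB]
  have hcong : ∀ (acc : List String) (c : Nat), c ∈ List.range (pvC u.length d) →
      (List.range (((pvUnrankF u.length u.length c d 0).map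
          (fun j => ((pvChoices u).getD j []).length)).foldl (fun a r => a * r) 1)).foldl
        (fun out t =>
          out ++ [String.ofList
            (((pvUnrankF u.length u.length c d 0).reverse.zip
                (((pvUnrankF u.length u.length c d 0).map
                  (fun j => ((pvChoices u).getD j []).length)).reverse)).foldl
              (fun (sv : List Char × Nat) jr =>
                (sv.1.set jr.1 (((pvChoices u).getD jr.1 []).getD (sv.2 % jr.2) ' '),
                 sv.2 / jr.2)) (u, t)).1]) acc
      = acc ++ (fun J => ((pvFP u (J.map pvN)).map
          (fun V => pvApp u ((J.map pvN).zip V))).map String.ofList)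
            ((pvCombinations (List.range u.length) d).getD c []) := by
    intro acc c hc
    have hcd : c < Nat.choose u.length d := by
      have := List.mem_range.mp hc
      rwa [pvC_eq_choose] at this
    have hJ : pvUnrankF u.length u.length c d 0
        = (pvCombinations (List.range u.length) d).getD c [] := by
      have := pv_unrank_get u.length 0 c d hcd
      rw [Nat.zero_add] at this
      rw [this, List.range_eq_range']
    rw [hJ]
    set J := (pvCombinations (List.range u.length) d).getD c [] with hJdef
    have hJmem : J ∈ pvCombinations (List.range u.length) d := by
      rw [hJdef, List.getD_eq_getElem _ _ (by rw [hlen]; exact hcd)]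
      exact List.getElem_mem _
    have hsub := pvCombinations_mem_sublist _ _ _ hJmem
    have hJlt : ∀ j ∈ J, j < u.length := by
      intro j hj
      exact List.mem_range.mp (hsub.subset hj)
    have hJpw : J.Pairwise (· < ·) := List.pairwise_lt_range.sublist hsub
    have hch : ∀ j ∈ J, (pvChoices u).getD j [] = pvCh u j := by
      intro j hj
      rw [pvChoices, List.getD_eq_getElem _ _ (by simpa using hJlt j hj), List.getElem_map,
        pvCh, List.getD_eq_getElem _ _ (hJlt j hj)]
      rfl
    have hrad : J.map (fun j => ((pvChoices u).getD j []).length)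
        = J.map (fun j => (pvCh u j).length) := by
      apply List.map_congr_left
      intro j hj
      rw [hch j hj]
    rw [hrad]
    have hzip : J.reverse.zip ((J.map (fun j => (pvCh u j).length)).reverse)
        = J.reverse.map (fun j => (j, (pvCh u j).length)) := by
      rw [← List.map_reverse, pv_zip_self_map]
    have hdec : ∀ t : Nat,
        ((J.reverse.zip ((J.map (fun j => (pvCh u j).length)).reverse)).foldl
          (fun (sv : List Char × Nat) jr =>
            (sv.1.set jr.1 (((pvChoices u).getD jr.1 []).getD (sv.2 % jr.2) ' '),
             sv.2 / jr.2)) (u, t))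
        = pvDecode u J.reverse (u, t) := by
      intro t
      rw [hzip, List.foldl_map, pvDecode]
      apply PySem.List.foldl_congr_mem
      intro sv j hjmem
      rw [hch j (List.mem_reverse.mp hjmem)]
    rw [pv_foldl_append_singleton]
    congr 1
    rw [List.map_congr_left (fun t _ => by rw [hdec t])]
    rw [show List.foldl (fun a r : Nat => a * r) 1 (J.map (fun j => (pvCh u j).length))
        = pvTot u J from rfl]
    show _ = ((pvFP u (J.map pvN)).map (fun V => pvApp u ((J.map pvN).zip V))).map String.ofList
    have h2 : (List.range (pvTot u J)).map (fun t => String.ofList (pvDecode u J.reverse (u, t)).1)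
        = ((List.range (pvTot u J)).map (fun t => (pvDecode u J.reverse (u, t)).1)).map
            String.ofList := by
      rw [List.map_map]
      rfl
    rw [h2, pv_decode_eq u J hJlt hJpw]
  rw [PySem.List.foldl_congr_mem _ _ _ _ hcong, PySem.List.foldl_append_eq_flatMap]
  congr 1
  have hrange : List.range (pvC u.length d)
      = List.range (pvCombinations (List.range u.length) d).length := by
    rw [hlen, pvC_eq_choose]
  rw [hrange]
  have hfr := pv_flatMap_range_getD (pvCombinations (List.range u.length) d) ([] : List Nat)
    (fun J => ((pvFP u (J.map pvN)).map (fun V => pvApp u ((J.map pvN).zip V))).map String.ofList)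
  rw [hfr]
  have hcomb : pvCombinations (PySem.List.pyRange 0 ((u.length : Nat) : Int) 1) d
      = (pvCombinations (List.range u.length) d).map (List.map pvN) := by
    rw [pv_R0N, pvCombinations_map]
  rw [pvExact, hcomb, List.flatMap_map, List.map_flatMap]

-- ---- B equals the accumulator ----
lemma pv_B_eq_acc (u : List Char) (m : Nat) :
    (PySem.List.pyRange 1 ((m : Int) + 1) 1).foldl (fun out d => pvLayerB u d.toNat out)
      ((pvAcc u 0).map String.ofList)
    = (pvAcc u m).map String.ofList := by
  induction m with
  | zero =>
    rw [show ((0 : Nat) : Int) + 1 = 1 by norm_num,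
      PySem.List.pyRange_one_eq_nil (le_refl 1), List.foldl_nil]
  | succ m ih =>
    rw [show (((m+1 : Nat)) : Int) + 1 = ((m : Int) + 1) + 1 by push_cast; ring,
      PySem.List.pyRange_one_succ_right (by omega), List.foldl_append, ih,
      List.foldl_cons, List.foldl_nil]
    have ht : ((m : Int) + 1).toNat = m + 1 := by omega
    rw [ht, pv_B_layer, pv_acc_succ, List.map_append]

-- layers beyond the string length are empty, so the accumulator stabilises
lemma pv_exact_gt (u : List Char) (d : Nat) (h : u.length < d) : pvExact u d = [] := by
  rw [pvExact, pvCombinations_empty]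
  · rfl
  · rw [PySem.List.length_pyRange_one]
    omega

lemma pv_acc_clip (u : List Char) : ∀ (m : Nat), pvAcc u m = pvAcc u (min m u.length) := by
  intro m
  induction m with
  | zero => simp
  | succ m ih =>
    by_cases h : m + 1 ≤ u.length
    · rw [Nat.min_eq_left h]
    · have h2 : u.length < m + 1 := by omega
      rw [pv_acc_succ, pv_exact_gt u _ h2, List.append_nil, ih,
        Nat.min_eq_right (by omega), Nat.min_eq_right (by omega)]

lemma pv_acc_nodup (u : List Char) : ∀ (m : Nat), (pvAcc u m).Nodup := by
  intro m
  induction m with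
  | zero => simp [pvAcc]
  | succ m ih =>
    rw [pv_acc_succ]
    apply List.Nodup.append ih (pv_exact_nodup u (m+1))
    intro t ht ht'
    have h1 := ((pv_mem_acc u m t).mp ht).2
    have h2 := ((pv_mem_exact u (m+1) t).mp ht').2
    omega

-- ===== VERDICT (by name: the statement is the Claim_ definition above) =====
theorem mismatch_sequence_spec : Claim_equal_mismatch_sequence := by
  intro seq k _
  unfold Spec_mismatch_sequence
  simp only [mismatch_sequence, mismatch_sequence_alt]
  by_cases hk : k ≤ 0
  · rw [if_pos hk]
    rw [PySem.List.pyRange_one_eq_nil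
      (by omega : min k ((PySem.Chars.upper seq.toList).length : Int) + 1 ≤ 1), List.foldl_nil]
    rfl
  · rw [if_neg hk]
    have h0 : 0 ≤ k := by omega
    set u := PySem.Chars.upper seq.toList with hu
    set mN : Nat := min k.toNat u.length with hmN
    have hmin : min k (u.length : Int) = ((mN : Nat) : Int) := by
      rw [hmN]
      omega
    rw [hmin]
    have hA := pv_A_eq_acc u k.toNat
    have hB := pv_B_eq_acc u mN
    rw [Int.toNat_of_nonneg h0] at hA
    have hnd : ((pvAcc u mN).map String.ofList).Nodup :=
      List.Nodup.map (fun a b h => String.ofList_inj.mp h) (pv_acc_nodup u mN)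
    have hfinal : (pvAcc u k.toNat).map String.ofList
        = PySem.Set.ofList ((pvAcc u mN).map String.ofList) := by
      rw [PySem.Set.ofList_eq_self_of_nodup _ hnd, pv_acc_clip u k.toNat, ← hmN]
    exact hA.trans (hfinal.trans (congrArg PySem.Set.ofList hB).symm)
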